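-- pv_equiv track=rewrite | github.com/sashacmc/mmdiary | src/mmdiary/transcriber.py | extract_caption
-- ===== SOURCE A (Python) =====
-- def extract_caption(text):
--     res = ""
--     if len(text) != 0:
--         res = text[0].upper()
--         for ch in text[1:]:
--             res += ch
--             if ch in ('\n', '.', '?', '!', ';'):
--                 break
--     return res.strip()
-- ===== SOURCE B (Python) =====
-- def extract_caption(text):
--     if not text:
--         return ""
--     body = text[1:]
--     cuts = [body.find(t) for t in '\n.?!;']
--     end = min((i for i in cuts if i >= 0), default=len(body) - 1)
--     return (text[0].upper() + body[:end + 1]).strip()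
-- ===== Notes on version B (the rewrite author's own statement) =====
-- stated objective: alternative
-- what changed: A accumulates characters one at a time in a loop that breaks at the first sentence terminator; B instead computes the cut position as the minimum of per-terminator str.find results over the tail and returns a single capitalize+slice+strip expression.
import Mathlib
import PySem

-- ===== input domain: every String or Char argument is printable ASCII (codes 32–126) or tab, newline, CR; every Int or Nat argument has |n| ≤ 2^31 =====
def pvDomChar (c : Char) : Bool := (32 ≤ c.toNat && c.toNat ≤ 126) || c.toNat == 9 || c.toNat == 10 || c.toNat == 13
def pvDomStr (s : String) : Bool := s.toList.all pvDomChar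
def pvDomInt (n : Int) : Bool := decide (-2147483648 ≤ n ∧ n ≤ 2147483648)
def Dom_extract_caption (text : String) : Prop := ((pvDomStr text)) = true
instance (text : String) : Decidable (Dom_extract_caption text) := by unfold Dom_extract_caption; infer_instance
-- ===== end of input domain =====

-- B replaces A's char-by-char accumulate-until-break loop by one find per terminator,
-- a min over the found positions, and a single slice+strip (objective: alternative decomposition).

-- ===== PORT A =====
def pvTerms : List Char := ['\n', '.', '?', '!', ';']

-- the 'for ch in text[1:]: res += ch; if ch in (...): break' loop
def pvExtractLoop (acc : List Char) : List Char → List Char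
  | [] => acc
  | c :: rest =>
    if c ∈ pvTerms then acc ++ [c] else pvExtractLoop (acc ++ [c]) rest

def extract_caption (text : String) : String :=
  let res : List Char :=
    if text.toList.length ≠ 0 then
      pvExtractLoop [PySem.Chars.upperChar text.toList.headI] text.toList.tail
    else []
  String.mk (PySem.Chars.strip res)

-- ===== PORT B =====
def extract_caption_alt (text : String) : String :=
  match text.toList with
  | [] => ""
  | c :: body =>
    let cuts : List Int := pvTerms.map (fun t => PySem.Chars.find body [t])
    let endv : Int :=
      (PySem.List.min? (cuts.filter (fun i => decide ((0:Int) ≤ i))) (fun x => x)).getD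
        ((body.length : Int) - 1)
    String.mk (PySem.Chars.strip
      (PySem.Chars.upperChar c :: PySem.List.slice body none (some (endv + 1))))

-- ===== PRECONDITION & SPEC =====
def Spec_extract_caption (text : String) (out : String) : Prop := out = extract_caption_alt text
instance (text : String) (out : String) : Decidable (Spec_extract_caption text out) := by unfold Spec_extract_caption; infer_instance

-- ===== CLAIM (what is proved, stated in full; the proofs are below) =====
def Claim_equal_extract_caption : Prop := ∀ (text : String), Dom_extract_caption text → Spec_extract_caption text (extract_caption text)

-- ===== LEMMAS AND PROOFS =====

-- what A's loop gathers from the tail: chars up to and including the first terminator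
def pvTakeU : List Char → List Char
  | [] => []
  | c :: r => if c ∈ pvTerms then [c] else c :: pvTakeU r

theorem pvLoop_eq (body : List Char) : ∀ acc, pvExtractLoop acc body = acc ++ pvTakeU body := by
  induction body with
  | nil => intro acc; simp [pvExtractLoop, pvTakeU]
  | cons c r ih =>
    intro acc
    by_cases h : c ∈ pvTerms
    · simp [pvExtractLoop, pvTakeU, h]
    · simp [pvExtractLoop, pvTakeU, h, ih]

theorem pvPrefix_single (t : Char) (l : List Char) : [t] <+: l ↔ l.head? = some t := by
  cases l with
  | nil => simp
  | cons x xs =>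
    constructor
    · rintro ⟨l', hl⟩
      simp at hl
      simp [hl.1]
    · intro h
      simp at h
      exact ⟨xs, by simp [h]⟩

theorem pvInfix_single (t : Char) (l : List Char) : [t] <:+: l ↔ t ∈ l := by
  constructor
  · intro h
    exact (List.singleton_sublist).mp h.sublist
  · intro h
    obtain ⟨l₁, l₂, hl⟩ := List.append_of_mem h
    exact ⟨l₁, l₂, by simp [hl]⟩

theorem pvFind_single (s : List Char) (t : Char) :
    PySem.Chars.find s [t] =
      if s.findIdx (fun c => c = t) < s.length then ((s.findIdx (fun c => c = t) : Int)) else -1 := by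
  by_cases h : s.findIdx (fun c => c = t) < s.length
  · have hmem : t ∈ s := by
      have := List.findIdx_getElem (p := fun c => c = t) (xs := s) (w := h)
      simp at this
      rw [← this]; exact List.getElem_mem h
    have hnn : 0 ≤ PySem.Chars.find s [t] := by
      rw [PySem.Chars.find_nonneg_iff]
      exact (pvInfix_single t s).mpr hmem
    obtain ⟨hpre, hmin⟩ := PySem.Chars.find_spec hnn
    have hget : s[(PySem.Chars.find s [t]).toNat]? = some t := by
      have := (pvPrefix_single t _).mp hpre
      rwa [List.head?_drop] at this
    have hlt : (PySem.Chars.find s [t]).toNat < s.length := by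
      by_contra hc
      simp [List.getElem?_eq_none (le_of_not_gt hc)] at hget
    -- the two first-occurrence indices coincide
    have heq : (PySem.Chars.find s [t]).toNat = s.findIdx (fun c => c = t) := by
      rcases lt_trichotomy (PySem.Chars.find s [t]).toNat (s.findIdx (fun c => c = t)) with hlt' | he | hgt
      · have := List.not_of_lt_findIdx hlt'
        simp [List.getElem?_eq_getElem hlt] at hget
        simp at this
        exact absurd hget this
      · exact he
      · exfalso
        apply hmin _ hgt
        rw [pvPrefix_single, List.head?_drop]
        have hg := List.findIdx_getElem (p := fun c => c = t) (xs := s) (w := h)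
        simp at hg
        simp [List.getElem?_eq_getElem h, hg]
    simp only [h, if_true]
    omega
  · have hnm : t ∉ s := by
      intro hmem
      exact h (List.findIdx_lt_length.mpr ⟨t, hmem, by simp⟩)
    simp only [h, if_false]
    rw [PySem.Chars.find_eq_neg_one_iff]
    intro hinf
    exact hnm ((pvInfix_single t s).mp hinf)

-- B's cut index equals the first overall terminator index (or len-1 if none)
theorem pvEndv_eq (body : List Char) :
    (PySem.List.min? (((pvTerms.map (fun t => PySem.Chars.find body [t])).filter
        (fun i => decide ((0:Int) ≤ i)))) (fun x => x)).getD ((body.length : Int) - 1)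
    = if body.findIdx (fun c => decide (c ∈ pvTerms)) < body.length
        then ((body.findIdx (fun c => decide (c ∈ pvTerms)) : Int))
        else (body.length : Int) - 1 := by
  set K := body.findIdx (fun c => decide (c ∈ pvTerms)) with hKdef
  by_cases hK : K < body.length
  · have hPK : body[K] ∈ pvTerms := by
      have := List.findIdx_getElem (p := fun c => decide (c ∈ pvTerms)) (xs := body) (w := hK)
      simpa using this
    set t0 := body[K] with ht0
    -- find body [t0] = K
    have hidx0 : body.findIdx (fun c => c = t0) = K := by
      have hle : body.findIdx (fun c => c = t0) ≤ K := by
        by_contra hc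
        have := List.not_of_lt_findIdx (p := fun c => c = t0) (xs := body) (i := K) (by omega)
        simp at this
        exact this ht0.symm
      have hlt0 : body.findIdx (fun c => c = t0) < body.length := lt_of_le_of_lt hle hK
      have hge : K ≤ body.findIdx (fun c => c = t0) := by
        by_contra hc
        have h1 := List.not_of_lt_findIdx (p := fun c => decide (c ∈ pvTerms))
          (xs := body) (i := body.findIdx (fun c => c = t0)) (by omega)
        have h2 := List.findIdx_getElem (p := fun c => c = t0) (xs := body) (w := hlt0)
        simp at h1 h2
        exact h1 (h2.symm ▸ hPK)
      omega
    have hfind0 : PySem.Chars.find body [t0] = (K : Int) := by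
      rw [pvFind_single, hidx0]
      simp [hK]
    have hKmem : (K : Int) ∈ (pvTerms.map (fun t => PySem.Chars.find body [t])).filter
        (fun i => decide ((0:Int) ≤ i)) := by
      rw [List.mem_filter]
      refine ⟨List.mem_map.mpr ⟨t0, hPK, hfind0⟩, by simp⟩
    obtain ⟨m, hm⟩ : ∃ m, PySem.List.min? ((pvTerms.map (fun t => PySem.Chars.find body [t])).filter
        (fun i => decide ((0:Int) ≤ i))) (fun x => x) = some m := by
      cases hmin : PySem.List.min? ((pvTerms.map (fun t => PySem.Chars.find body [t])).filter
          (fun i => decide ((0:Int) ≤ i))) (fun x => x) with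
      | none =>
        rw [PySem.List.min?_eq_none_iff] at hmin
        rw [hmin] at hKmem
        simp at hKmem
      | some m => exact ⟨m, rfl⟩
    have hmle : m ≤ (K : Int) := PySem.List.min?_isMin hm _ hKmem
    have hmmem := PySem.List.min?_mem hm
    rw [List.mem_filter] at hmmem
    obtain ⟨hmap, hnn⟩ := hmmem
    obtain ⟨t, htmem, htfind⟩ := List.mem_map.mp hmap
    have hnn' : (0:Int) ≤ m := by simpa using hnn
    have hKlem : (K : Int) ≤ m := by
      rw [pvFind_single] at htfind
      by_cases hlt : body.findIdx (fun c => c = t) < body.length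
      · simp only [hlt, if_true] at htfind
        -- m is an index whose char is a terminator, so K ≤ it
        have hgt : body[body.findIdx (fun c => c = t)] = t := by
          have := List.findIdx_getElem (p := fun c => c = t) (xs := body) (w := hlt)
          simpa using this
        have : K ≤ body.findIdx (fun c => c = t) := by
          by_contra hc
          have h1 := List.not_of_lt_findIdx (p := fun c => decide (c ∈ pvTerms))
            (xs := body) (i := body.findIdx (fun c => c = t)) (by omega)
          simp at h1
          exact h1 (hgt.symm ▸ htmem)
        omega
      · simp only [hlt, if_false] at htfind
        omega
    have hmK : m = (K : Int) := le_antisymm hmle hKlem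
    rw [hm, hmK]
    simp [hK]
  · -- no terminator in body: every find is -1
    have hall : ∀ t ∈ pvTerms, PySem.Chars.find body [t] = -1 := by
      intro t ht
      rw [pvFind_single]
      have : ¬ body.findIdx (fun c => c = t) < body.length := by
        intro hlt
        apply hK
        rw [hKdef, List.findIdx_lt_length]
        refine ⟨body[body.findIdx (fun c => c = t)], List.getElem_mem hlt, ?_⟩
        have := List.findIdx_getElem (p := fun c => c = t) (xs := body) (w := hlt)
        simp at this
        simp [this, ht]
      simp [this]
    have hfilter : (pvTerms.map (fun t => PySem.Chars.find body [t])).filter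
        (fun i => decide ((0:Int) ≤ i)) = [] := by
      rw [List.filter_eq_nil_iff]
      intro x hx
      obtain ⟨t, ht, hxt⟩ := List.mem_map.mp hx
      rw [hall t ht] at hxt
      simp [← hxt]
    rw [hfilter]
    simp [PySem.List.min?, hK]

-- the sliced tail equals what A's loop gathers
theorem pvTake_eq (body : List Char) :
    body.take (((if body.findIdx (fun c => decide (c ∈ pvTerms)) < body.length
        then ((body.findIdx (fun c => decide (c ∈ pvTerms)) : Int))
        else (body.length : Int) - 1) + 1).toNat) = pvTakeU body := by
  induction body with
  | nil => simp [pvTakeU]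
  | cons x xs ih =>
    rw [List.findIdx_cons]
    by_cases hx : x ∈ pvTerms
    · simp [hx, pvTakeU]
    · simp only [hx, decide_false, cond_false]
      by_cases hxs : xs.findIdx (fun c => decide (c ∈ pvTerms)) < xs.length
      · have h1 : xs.findIdx (fun c => decide (c ∈ pvTerms)) + 1 < (x :: xs).length := by
          simp only [List.length_cons]; omega
        simp only [h1, if_true]
        simp only [hxs, if_true] at ih
        have h2 : ((((xs.findIdx (fun c => decide (c ∈ pvTerms)) + 1 : Nat) : Int)) + 1).toNat
            = (((xs.findIdx (fun c => decide (c ∈ pvTerms)) : Nat) : Int) + 1).toNat + 1 := by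
          omega
        rw [h2, List.take_succ_cons, ih]
        simp [pvTakeU, hx]
      · have h1 : ¬ xs.findIdx (fun c => decide (c ∈ pvTerms)) + 1 < (x :: xs).length := by
          simp only [List.length_cons]; omega
        simp only [h1, if_false]
        simp only [hxs, if_false] at ih
        have h2 : (((x :: xs).length : Int) - 1 + 1).toNat = xs.length + 1 := by
          simp only [List.length_cons]; omega
        rw [h2, List.take_succ_cons]
        have h3 : ((xs.length : Int) - 1 + 1).toNat = xs.length := by omega
        rw [h3] at ih
        simp at ih
        simp [pvTakeU, hx, ← ih]

-- ===== VERDICT (by name: the statement is the Claim_ definition above) =====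
theorem extract_caption_spec : Claim_equal_extract_caption := by
  intro text _
  unfold Spec_extract_caption extract_caption extract_caption_alt
  cases h : text.toList with
  | nil => decide
  | cons c body =>
    simp only [List.length_cons, List.headI, List.tail_cons]
    have hne : body.length + 1 ≠ 0 := by omega
    simp only [hne, if_true, ne_eq, not_false_iff]
    congr 1
    congr 1
    rw [pvLoop_eq]
    rw [pvEndv_eq]
    have hnn : (0:Int) ≤ (if body.findIdx (fun c => decide (c ∈ pvTerms)) < body.length
        then ((body.findIdx (fun c => decide (c ∈ pvTerms)) : Int))
        else (body.length : Int) - 1) + 1 := by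
      split_ifs <;> omega
    rw [PySem.List.slice_to _ hnn, pvTake_eq]
    simp
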